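-- pv_equiv track=rewrite | github.com/bicuspid-valve/PDDL-Responsibility-Solver | hanabi_pddl_main.py | getnextplan
-- ===== SOURCE A (Python) =====
-- def getnextplan(plan):
--     index = len(plan)-1
--     done = False
--     finished = False
--     while not done:
--         if index == -1:
--             plan = ["discard"]*len(plan)
--             done = True
--             finished = True
--         elif plan[index] == "play":
--             plan[index] = "discard"
--             done = True
--         else:
--             plan[index] = "play"
--             index -= 1
--     return plan,finished
-- ===== SOURCE B (Python) =====
-- def getnextplan(plan):
--     # Encode the plan as a binary counter, MSB first: "play" is a 0 bit, anything else a 1 bit.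
--     n = len(plan)
--     v = int('0' + ''.join('0' if s == "play" else '1' for s in plan), 2)
--     if v == (1 << n) - 1:
--         # the counter is at its maximum (also for n == 0): wrap to the all-"discard" finished state
--         return ["discard"] * n, True
--     # increment, then write back only the bits the increment changed, right to left
--     w = v + 1
--     i = n
--     while v != w:
--         i -= 1
--         plan[i] = "discard" if w & 1 else "play"
--         v >>= 1
--         w >>= 1
--     return plan, False
-- ===== Notes on version B (the rewrite author's own statement) =====
-- stated objective: alternative
-- what changed: B maintains an integer instead of scanning strings: it encodes the plan as a binary counter ("play"=0 bit, anything else=1, MSB first), detects the finished state as v == 2**n - 1, and otherwise increments the integer and writes back only the bits the increment changed, right to left.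
import Mathlib
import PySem

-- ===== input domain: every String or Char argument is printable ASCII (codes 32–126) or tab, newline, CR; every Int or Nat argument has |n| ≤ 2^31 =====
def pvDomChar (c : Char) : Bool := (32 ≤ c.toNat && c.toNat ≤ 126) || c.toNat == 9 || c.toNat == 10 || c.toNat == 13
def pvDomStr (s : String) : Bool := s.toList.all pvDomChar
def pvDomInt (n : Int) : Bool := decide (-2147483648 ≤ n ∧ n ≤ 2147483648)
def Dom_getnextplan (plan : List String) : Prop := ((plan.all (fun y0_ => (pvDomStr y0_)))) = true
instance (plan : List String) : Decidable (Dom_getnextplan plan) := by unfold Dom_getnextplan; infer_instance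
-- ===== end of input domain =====

-- B treats the plan as a binary counter: it encodes it into an integer ("play" = 0 bit, anything
-- else = 1, MSB first), detects overflow as v = 2^n - 1, and otherwise increments and writes back
-- only the changed low bits.  Return values agree with A everywhere; both mutate the argument list
-- in place in Python (the equivalence proved here is about the return value only).

-- ===== PORT A =====
-- A's while-loop: counter c stands for index+1 (c = 0 is index == -1); plan is updated in place via List.set.
def getnextplanLoopA : List String → Nat → List String × Bool
  | plan, 0 => (List.replicate plan.length "discard", true)
  | plan, c + 1 =>
    if plan.getD c "" = "play" then (plan.set c "discard", false)
    else getnextplanLoopA (plan.set c "play") c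

def getnextplan (plan : List String) : List String × Bool :=
  getnextplanLoopA plan plan.length

-- ===== PORT B =====
-- B's bit characters: '0' if s == "play" else '1'
def bitCharB (s : String) : Char := if s = "play" then '0' else '1'

-- one step of base-2 parsing, as int(·, 2) performs it digit by digit
def parse2StepB (v : Nat) (c : Char) : Nat := 2 * v + (if c = '1' then 1 else 0)

-- B's write-back while-loop: while v != w: i -= 1; plan[i] = bit; v >>= 1; w >>= 1
def writeBackB (plan : List String) (i v w : Nat) : List String × Bool :=
  if v = w then (plan, false)
  else writeBackB (plan.set (i - 1) (if w % 2 = 1 then "discard" else "play")) (i - 1) (v / 2) (w / 2)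
termination_by v + w
decreasing_by omega

def getnextplan_alt (plan : List String) : List String × Bool :=
  let n := plan.length
  let v := ('0' :: plan.map bitCharB).foldl parse2StepB 0
  if v = 2 ^ n - 1 then (List.replicate n "discard", true)
  else writeBackB plan n v (v + 1)

-- ===== PRECONDITION & SPEC =====
def Spec_getnextplan (plan : List String) (out : List String × Bool) : Prop := out = getnextplan_alt plan
instance (plan : List String) (out : List String × Bool) : Decidable (Spec_getnextplan plan out) := by unfold Spec_getnextplan; infer_instance

-- ===== CLAIM (what is proved, stated in full; the proofs are below) =====
def Claim_equal_getnextplan : Prop := ∀ (plan : List String), Dom_getnextplan plan → Spec_getnextplan plan (getnextplan plan)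

-- ===== LEMMAS AND PROOFS =====

-- the list writeBackB produces: positions i-1 down to i-u get "play", position i-1-u gets "discard"
def wbSpec (p : List String) (i u : Nat) : List String :=
  match u with
  | 0 => p.set (i - 1) "discard"
  | u + 1 => wbSpec (p.set (i - 1) "play") (i - 1) u

-- proof-side abbreviation: one encoding step expressed on the plan entry itself
def encStepB (v : Nat) (s : String) : Nat := 2 * v + (if s = "play" then 0 else 1)

theorem parse2_eq_enc (plan : List String) :
    ('0' :: plan.map bitCharB).foldl parse2StepB 0 = plan.foldl encStepB 0 := by
  show (plan.map bitCharB).foldl parse2StepB (parse2StepB 0 '0') = _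
  have h0 : parse2StepB 0 '0' = 0 := by decide
  rw [h0, List.foldl_map]
  have hf : (fun (v : Nat) (s : String) => parse2StepB v (bitCharB s)) = encStepB := by
    funext v s
    simp only [parse2StepB, encStepB, bitCharB]
    by_cases hs : s = "play" <;> simp [hs]
  rw [hf]

theorem encB_shift : ∀ (xs : List String) (v : Nat),
    xs.foldl encStepB v = v * 2 ^ xs.length + xs.foldl encStepB 0 := by
  intro xs
  induction xs with
  | nil => intro v; simp [List.foldl]
  | cons x xs ih =>
    intro v
    simp only [List.foldl, List.length_cons]
    rw [ih (encStepB v x), ih (encStepB 0 x)]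
    simp only [encStepB]
    ring

theorem encB_lt : ∀ (xs : List String), xs.foldl encStepB 0 < 2 ^ xs.length := by
  intro xs
  induction xs with
  | nil => simp [List.foldl]
  | cons x xs ih =>
    simp only [List.foldl, List.length_cons]
    rw [encB_shift xs (encStepB 0 x)]
    have hb : encStepB 0 x ≤ 1 := by simp [encStepB]; split <;> omega
    have h2 : encStepB 0 x * 2 ^ xs.length ≤ 2 ^ xs.length := by
      calc encStepB 0 x * 2 ^ xs.length ≤ 1 * 2 ^ xs.length := Nat.mul_le_mul_right _ hb
        _ = 2 ^ xs.length := by ring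
    have : 2 ^ (xs.length + 1) = 2 ^ xs.length + 2 ^ xs.length := by ring
    omega

theorem encB_all_nonplay : ∀ (xs : List String), (∀ s ∈ xs, s ≠ "play") →
    xs.foldl encStepB 0 = 2 ^ xs.length - 1 := by
  intro xs
  induction xs with
  | nil => intro _; simp [List.foldl]
  | cons x xs ih =>
    intro h
    simp only [List.foldl, List.length_cons]
    rw [encB_shift xs (encStepB 0 x)]
    have hx : encStepB 0 x = 1 := by
      simp [encStepB, h x (List.mem_cons_self ..)]
    rw [hx, ih (fun s hs => h s (List.mem_cons_of_mem _ hs))]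
    have : (1:Nat) ≤ 2 ^ xs.length := Nat.one_le_two_pow
    have : 2 ^ (xs.length + 1) = 2 ^ xs.length + 2 ^ xs.length := by ring
    omega

theorem wb_run : ∀ (u : Nat) (a : Nat) (p : List String) (i : Nat),
    writeBackB p i ((2 * a + 1) * 2 ^ u - 1) ((2 * a + 1) * 2 ^ u) = (wbSpec p i u, false) := by
  intro u
  induction u with
  | zero =>
    intro a p i
    rw [writeBackB]
    have h1 : ¬ ((2 * a + 1) * 2 ^ 0 - 1 = (2 * a + 1) * 2 ^ 0) := by simp
    rw [if_neg h1]
    have hw : (2 * a + 1) * 2 ^ 0 % 2 = 1 := by simp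
    rw [hw, if_pos rfl]
    have hv : ((2 * a + 1) * 2 ^ 0 - 1) / 2 = a := by simp
    have hw2 : (2 * a + 1) * 2 ^ 0 / 2 = a := by simp; omega
    rw [hv, hw2, writeBackB, if_pos rfl]
    rfl
  | succ u ih =>
    intro a p i
    rw [writeBackB]
    have hk : (1:Nat) ≤ 2 ^ u := Nat.one_le_two_pow
    have hpow : (2 * a + 1) * 2 ^ (u + 1) = 2 * ((2 * a + 1) * 2 ^ u) := by ring
    have h1 : ¬ ((2 * a + 1) * 2 ^ (u + 1) - 1 = (2 * a + 1) * 2 ^ (u + 1)) := by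
      rw [hpow]; have : 1 ≤ (2*a+1) * 2^u := Nat.one_le_iff_ne_zero.mpr (by positivity)
      omega
    rw [if_neg h1]
    have hmk : 1 ≤ (2*a+1) * 2^u := Nat.one_le_iff_ne_zero.mpr (by positivity)
    have hw : (2 * a + 1) * 2 ^ (u + 1) % 2 = 0 := by rw [hpow]; omega
    rw [hw]
    have hv : ((2 * a + 1) * 2 ^ (u + 1) - 1) / 2 = (2 * a + 1) * 2 ^ u - 1 := by rw [hpow]; omega
    have hw2 : (2 * a + 1) * 2 ^ (u + 1) / 2 = (2 * a + 1) * 2 ^ u := by rw [hpow]; omega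
    rw [if_neg (by decide), hv, hw2, ih a]
    rfl

theorem wbSpec_elem : ∀ (u : Nat) (p : List String) (c j : Nat), c + u < p.length →
    (wbSpec p (c + 1 + u) u)[j]? =
      if c ≤ j ∧ j ≤ c + u then some (if j = c then "discard" else "play") else p[j]? := by
  intro u
  induction u with
  | zero =>
    intro p c j h
    simp only [wbSpec]
    have hc : c + 1 + 0 - 1 = c := by omega
    rw [hc]
    by_cases hj : j = c
    · rw [hj, List.getElem?_set_self (show c < p.length by omega)]
      simp
    · rw [List.getElem?_set_ne (show c ≠ j by omega)]
      split_ifs with h2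
      · omega
      · rfl
  | succ u ih =>
    intro p c j h
    have hstep : wbSpec p (c + 1 + (u + 1)) (u + 1)
        = wbSpec (p.set (c + 1 + u) "play") (c + 1 + u) u := by
      rfl
    have hlen : c + u < (p.set (c + 1 + u) "play").length := by rw [List.length_set]; omega
    rw [hstep, ih _ c j hlen]
    by_cases hj1 : c ≤ j ∧ j ≤ c + u
    · rw [if_pos hj1, if_pos (show c ≤ j ∧ j ≤ c + (u + 1) by omega)]
    · rw [if_neg hj1]
      by_cases hj2 : j = c + 1 + u
      · rw [hj2, List.getElem?_set_self (show c + 1 + u < p.length by omega),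
          if_pos (show c ≤ c + 1 + u ∧ c + 1 + u ≤ c + (u + 1) by omega),
          if_neg (show ¬ (c + 1 + u = c) by omega)]
      · rw [List.getElem?_set_ne (show c + 1 + u ≠ j by omega),
          if_neg (show ¬ (c ≤ j ∧ j ≤ c + (u + 1)) by omega)]

-- B on a plan whose rightmost "play" is at position t.length
theorem arith1 (a u : Nat) : 2 * a * 2 ^ u + (2 ^ u - 1) = (2 * a + 1) * 2 ^ u - 1 := by
  have hK : (1:Nat) ≤ 2 ^ u := Nat.one_le_two_pow
  have h2 : (2 * a + 1) * 2 ^ u = 2 * (a * 2 ^ u) + 2 ^ u := by ring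
  have h3 : 2 * a * 2 ^ u = 2 * (a * 2 ^ u) := by ring
  omega

theorem arith2 (a c u n : Nat) (ha : a < 2 ^ c) (hn : n = c + 1 + u) :
    (2 * a + 1) * 2 ^ u - 1 ≠ 2 ^ n - 1 := by
  have hK : (1:Nat) ≤ 2 ^ u := Nat.one_le_two_pow
  have hC : (1:Nat) ≤ 2 ^ c := Nat.one_le_two_pow
  have h2n : (2:Nat) ^ n = 2 * (2 ^ c * 2 ^ u) := by
    rw [hn, pow_add, pow_add, pow_one]; ring
  have hle : (2 * a + 1) * 2 ^ u ≤ (2 * 2 ^ c - 1) * 2 ^ u :=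
    Nat.mul_le_mul_right _ (by omega)
  have hexp : (2 * 2 ^ c - 1) * 2 ^ u = 2 * (2 ^ c * 2 ^ u) - 2 ^ u := by
    rw [Nat.sub_mul]; ring_nf
  have hXK : 2 ^ u ≤ (2 * a + 1) * 2 ^ u := Nat.le_mul_of_pos_left _ (by omega)
  omega

theorem alt_play (t uL : List String) (h : ∀ s ∈ uL, s ≠ "play") :
    getnextplan_alt (t ++ "play" :: uL) =
      (wbSpec (t ++ "play" :: uL) (t.length + 1 + uL.length) uL.length, false) := by
  have hlen : (t ++ "play" :: uL).length = t.length + 1 + uL.length := by simp; omega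
  have hv : (t ++ "play" :: uL).foldl encStepB 0
      = (2 * t.foldl encStepB 0 + 1) * 2 ^ uL.length - 1 := by
    rw [List.foldl_append]
    show uL.foldl encStepB (encStepB (t.foldl encStepB 0) "play") = _
    rw [show encStepB (t.foldl encStepB 0) "play" = 2 * t.foldl encStepB 0 from by simp [encStepB]]
    rw [encB_shift, encB_all_nonplay uL h]
    exact arith1 _ _
  have hne : (t ++ "play" :: uL).foldl encStepB 0 ≠ 2 ^ (t ++ "play" :: uL).length - 1 := by
    rw [hv]
    exact arith2 _ _ _ _ (encB_lt t) hlen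
  simp only [getnextplan_alt]
  rw [parse2_eq_enc, if_neg hne, hv, hlen]
  have hK : (1:Nat) ≤ 2 ^ uL.length := Nat.one_le_two_pow
  have hXK : 2 ^ uL.length ≤ (2 * t.foldl encStepB 0 + 1) * 2 ^ uL.length :=
    Nat.le_mul_of_pos_left _ (by omega)
  rw [show (2 * t.foldl encStepB 0 + 1) * 2 ^ uL.length - 1 + 1
      = (2 * t.foldl encStepB 0 + 1) * 2 ^ uL.length from by omega]
  exact wb_run uL.length (t.foldl encStepB 0) _ _

-- main invariant: p is A's mutated plan, q the original; they agree below c, p is all "play"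
-- from c on, and q is all non-"play" from c on
theorem loopA_eq_alt : ∀ (c : Nat) (p q : List String),
    p.length = q.length →
    (∀ j, j < c → p[j]? = q[j]?) →
    (∀ j, c ≤ j → j < p.length → p[j]? = some "play" ∧ ∀ s, q[j]? = some s → s ≠ "play") →
    c ≤ p.length →
    getnextplanLoopA p c = getnextplan_alt q := by
  intro c
  induction c with
  | zero =>
    intro p q hlen hlow hhigh hle
    have hall : ∀ s ∈ q, s ≠ "play" := by
      intro s hs
      obtain ⟨j, hj, hje⟩ := List.getElem_of_mem hs
      exact (hhigh j (Nat.zero_le _) (by omega)).2 s (by rw [List.getElem?_eq_getElem hj, hje])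
    have henc : q.foldl encStepB 0 = 2 ^ q.length - 1 := encB_all_nonplay q hall
    show (List.replicate p.length "discard", true) = _
    simp only [getnextplan_alt]
    rw [parse2_eq_enc, if_pos henc, hlen]
  | succ c ih =>
    intro p q hlen hlow hhigh hle
    have hclt : c < p.length := by omega
    have hclq : c < q.length := by omega
    have hpc : p[c]? = q[c]? := hlow c (Nat.lt_succ_self c)
    have hgd : p.getD c "" = q[c] := by
      rw [List.getD_eq_getElem?_getD, hpc, List.getElem?_eq_getElem hclq]; rfl
    show (if p.getD c "" = "play" then (p.set c "discard", false)
      else getnextplanLoopA (p.set c "play") c) = _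
    by_cases hplay : q[c] = "play"
    · rw [if_pos (by rw [hgd, hplay])]
      have hdecomp : q = q.take c ++ "play" :: q.drop (c + 1) := by
        conv_lhs => rw [← List.take_append_drop c q]
        rw [List.drop_eq_getElem_cons hclq, hplay]
      have hnon : ∀ s ∈ q.drop (c + 1), s ≠ "play" := by
        intro s hs
        obtain ⟨j, hj, hje⟩ := List.getElem_of_mem hs
        rw [List.getElem_drop] at hje
        refine (hhigh (c + 1 + j) (by omega) (by rw [List.length_drop] at hj; omega)).2 s ?_
        rw [List.getElem?_eq_getElem (by rw [List.length_drop] at hj; omega), hje]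
      have htl : (q.take c).length = c := by rw [List.length_take]; omega
      have hul : (q.drop (c + 1)).length = q.length - (c + 1) := List.length_drop ..
      have halt := alt_play (q.take c) (q.drop (c + 1)) hnon
      rw [← hdecomp, htl, hul] at halt
      rw [halt]
      refine Prod.ext ?_ rfl
      apply List.ext_getElem?
      intro j
      rw [wbSpec_elem _ q c j (by omega)]
      by_cases h1 : c ≤ j ∧ j ≤ c + (q.length - (c + 1))
      · rw [if_pos h1]
        by_cases hjc : j = c
        · subst hjc
          rw [List.getElem?_set_self (by omega), if_pos rfl]
        · rw [List.getElem?_set_ne (show c ≠ j by omega), if_neg hjc]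
          exact (hhigh j (by omega) (by omega)).1
      · rw [if_neg h1]
        by_cases hj : j < c
        · rw [List.getElem?_set_ne (show c ≠ j by omega)]
          exact hlow j (by omega)
        · rw [List.getElem?_set_ne (show c ≠ j by omega)]
          rw [List.getElem?_eq_none (by omega), List.getElem?_eq_none (by omega)]
    · rw [if_neg (by rw [hgd]; exact hplay)]
      apply ih
      · rw [List.length_set]; exact hlen
      · intro j hj
        rw [List.getElem?_set_ne (by omega)]
        exact hlow j (by omega)
      · intro j hcj hjlen
        rw [List.length_set] at hjlen
        by_cases hjc : j = c
        · subst hjc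
          refine ⟨List.getElem?_set_self (by omega), ?_⟩
          intro s hsome hs
          apply hplay
          rw [List.getElem?_eq_getElem hclq] at hsome
          rw [← hs]; exact (Option.some.injEq ..).mp hsome |>.symm ▸ rfl
        · rw [List.getElem?_set_ne (by omega)]
          exact hhigh j (by omega) hjlen
      · rw [List.length_set]; omega

-- ===== VERDICT (by name: the statement is the Claim_ definition above) =====
theorem getnextplan_spec : Claim_equal_getnextplan := by
  intro plan _
  unfold Spec_getnextplan getnextplan
  exact loopA_eq_alt plan.length plan plan rfl (fun _ _ => rfl)
    (fun j hj hjl => absurd hjl (by omega)) (le_refl _)
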